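-- pv_equiv track=rewrite | github.com/Agomez-jaime/Invoice-Data-Extraction-Script | veryfi_test.py | split_records
-- ===== SOURCE A (Python) =====
-- def split_records(data, start_keywords):
--     records = []
--     current = ""
--
--     for line in data:
--         line = line.strip()
--         if any(line.startswith(k) for k in start_keywords):
--             if current:
--                 records.append(current.strip())
--             current = line
--         else:
--             current += " " + line
--     if current:
--         records.append(current.strip())
--     return records
-- ===== SOURCE B (Python) =====
-- def split_records(data, start_keywords):
--     def is_start(s):
--         return any(s.startswith(k) for k in start_keywords)
--
--     def split_at_next_start(lines):
--         for i, s in enumerate(lines):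
--             if is_start(s):
--                 return lines[:i], lines[i:]
--         return lines, []
--
--     stripped = [l.strip() for l in data]
--     records = []
--     lead, rest = split_at_next_start(stripped)
--     if lead:
--         records.append(" ".join(lead).strip())
--     while rest:
--         head, tail = rest[0], rest[1:]
--         seg_tail, rest = split_at_next_start(tail)
--         seg = [head] + seg_tail
--         if len(seg) > 1 or seg[0]:
--             records.append(" ".join(seg).strip())
--     return records
-- ===== Notes on version B (the rewrite author's own statement) =====
-- stated objective: alternative
-- what changed: B replaces A's incremental string-accumulator fold with a span-based splitter: strip all lines once, cut the list at keyword boundaries with a split_at_next_start helper, and emit each segment as ' '.join(segment).strip().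
import Mathlib
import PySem

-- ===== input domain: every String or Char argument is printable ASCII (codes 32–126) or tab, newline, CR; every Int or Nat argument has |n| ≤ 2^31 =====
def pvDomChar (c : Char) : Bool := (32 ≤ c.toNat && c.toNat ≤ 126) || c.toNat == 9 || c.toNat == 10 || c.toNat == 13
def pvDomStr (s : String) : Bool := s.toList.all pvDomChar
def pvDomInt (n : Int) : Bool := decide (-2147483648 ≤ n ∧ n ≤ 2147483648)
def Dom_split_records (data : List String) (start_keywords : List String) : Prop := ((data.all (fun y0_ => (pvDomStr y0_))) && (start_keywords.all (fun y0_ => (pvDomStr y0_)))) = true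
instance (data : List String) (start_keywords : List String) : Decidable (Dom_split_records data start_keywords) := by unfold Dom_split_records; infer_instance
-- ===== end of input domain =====

-- B replaces A's incremental string accumulator with a span-based splitter (cut the stripped
-- lines at keyword boundaries, join each segment); objective: alternative decomposition, same cost.


-- ===== PORT A =====
def split_records (data : List String) (start_keywords : List String) : List String :=
  let st := data.foldl
    (fun (st : List String × String) line =>
      let line := PySem.Str.strip line
      if start_keywords.any (fun k => PySem.Str.startswith line k) then
        ((if st.2 ≠ "" then st.1 ++ [PySem.Str.strip st.2] else st.1), line)
      else
        (st.1, st.2 ++ " " ++ line))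
    ([], "")
  if st.2 ≠ "" then st.1 ++ [PySem.Str.strip st.2] else st.1

-- ===== PORT B =====
def pvIsStart (start_keywords : List String) (s : String) : Bool :=
  start_keywords.any (fun k => PySem.Str.startswith s k)

-- Source B's split_at_next_start: linear scan to the first keyword line, return (lines[:i], lines[i:]);
-- this span is exactly (takeWhile not-start, dropWhile not-start).
def pvSplitAtNextStart (ks : List String) (lines : List String) : List String × List String :=
  (lines.takeWhile (fun s => !pvIsStart ks s), lines.dropWhile (fun s => !pvIsStart ks s))

-- Source B's while loop over rest; seg is nonempty so Python's seg[0] is head.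
def pvWhileRest (ks : List String) : List String → List String
  | [] => []
  | head :: tail =>
    let seg_tail := (pvSplitAtNextStart ks tail).1
    let rest := (pvSplitAtNextStart ks tail).2
    let seg := head :: seg_tail
    (if seg.length > 1 ∨ head ≠ "" then [PySem.Str.strip (PySem.Str.join " " seg)] else [])
      ++ pvWhileRest ks rest
termination_by l => l.length
decreasing_by
  simp only [pvSplitAtNextStart]
  have := List.length_dropWhile_le (fun s => !pvIsStart ks s) tail
  simp only [List.length_cons]
  omega

def split_records_alt (data : List String) (start_keywords : List String) : List String :=
  let stripped := data.map PySem.Str.strip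
  let lead := (pvSplitAtNextStart start_keywords stripped).1
  let rest := (pvSplitAtNextStart start_keywords stripped).2
  (if lead ≠ [] then [PySem.Str.strip (PySem.Str.join " " lead)] else [])
    ++ pvWhileRest start_keywords rest

-- ===== PRECONDITION & SPEC =====
def Spec_split_records (data : List String) (start_keywords : List String) (out : List String) : Prop := out = split_records_alt data start_keywords
instance (data : List String) (start_keywords : List String) (out : List String) : Decidable (Spec_split_records data start_keywords out) := by unfold Spec_split_records; infer_instance

-- ===== CLAIM (what is proved, stated in full; the proofs are below) =====
def Claim_equal_split_records : Prop := ∀ (data : List String) (start_keywords : List String), Dom_split_records data start_keywords → Spec_split_records data start_keywords (split_records data start_keywords)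

-- ===== LEMMAS AND PROOFS =====

-- A's loop step and final flush, named for the proofs (over already-stripped lines).
def pvStepA (ks : List String) (st : List String × String) (line : String) : List String × String :=
  if pvIsStart ks line then
    ((if st.2 ≠ "" then st.1 ++ [PySem.Str.strip st.2] else st.1), line)
  else (st.1, st.2 ++ " " ++ line)

def pvFin (st : List String × String) : List String :=
  if st.2 ≠ "" then st.1 ++ [PySem.Str.strip st.2] else st.1

def pvRunA (ks : List String) (cur : String) : List String → List String
  | [] => if cur ≠ "" then [PySem.Str.strip cur] else []
  | x :: xs =>
    if pvIsStart ks x then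
      (if cur ≠ "" then [PySem.Str.strip cur] else []) ++ pvRunA ks x xs
    else
      pvRunA ks (cur ++ " " ++ x) xs

-- string facts
theorem pv_space_append_ne (s : String) : (" " ++ s) ≠ "" := by
  intro h
  have := congrArg String.toList h
  simp [String.toList_append] at this

theorem pv_strip_space_append (s : String) :
    PySem.Str.strip (" " ++ s) = PySem.Str.strip s := by
  rw [← String.toList_inj]
  simp only [PySem.Str.toList_strip, String.toList_append]
  have h1 : (" " : String).toList = [' '] := rfl
  rw [h1]
  simp [PySem.Chars.strip, PySem.Chars.lstrip,
    show PySem.Chars.isspace ' ' = true by decide]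

theorem pv_join_append_singleton (acc : List String) (x : String) (h : acc ≠ []) :
    PySem.Str.join " " acc ++ " " ++ x = PySem.Str.join " " (acc ++ [x]) := by
  induction acc with
  | nil => cases h rfl
  | cons a t ih =>
    cases t with
    | nil =>
      rw [← String.toList_inj]
      simp [PySem.Str.toList_join, String.toList_append, PySem.Chars.join_singleton,
        PySem.Chars.join_cons_cons]
    | cons b t' =>
      rw [← String.toList_inj] at ih ⊢
      simp only [PySem.Str.toList_join, String.toList_append, List.map_cons,
        PySem.Chars.join_cons_cons, List.map_append, List.cons_append] at *
      have ih' := ih (by simp)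
      simp [List.append_assoc] at ih' ⊢
      exact ih'

theorem pv_join_singleton (x : String) : PySem.Str.join " " [x] = x := by
  rw [← String.toList_inj]
  simp [PySem.Str.toList_join, PySem.Chars.join_singleton]

theorem pv_join_ne_empty_iff (x : String) (t : List String) :
    (PySem.Str.join " " (x :: t) ≠ "") ↔ ((x :: t).length > 1 ∨ x ≠ "") := by
  cases t with
  | nil =>
    rw [pv_join_singleton]
    simp
  | cons b t' =>
    constructor
    · intro _; left; simp
    · intro _ h
      have := congrArg String.toList h
      simp only [PySem.Str.toList_join, List.map_cons, PySem.Chars.join_cons_cons] at this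
      rw [show (" " : String).toList = [' '] from rfl] at this
      simp at this

theorem pv_lead_step (acc : List String) (x : String) (h : acc ≠ []) :
    (" " ++ PySem.Str.join " " acc) ++ " " ++ x = " " ++ PySem.Str.join " " (acc ++ [x]) := by
  rw [← pv_join_append_singleton _ _ h, ← String.toList_inj]
  simp [String.toList_append]

-- unfolding lemmas for B's while loop
theorem pvWhileRest_nil (ks : List String) : pvWhileRest ks [] = [] := by
  rw [pvWhileRest.eq_def]

theorem pvWhileRest_cons (ks : List String) (head : String) (tail : List String) :
    pvWhileRest ks (head :: tail) =
      (if (head :: tail.takeWhile (fun s => !pvIsStart ks s)).length > 1 ∨ head ≠ "" then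
          [PySem.Str.strip (PySem.Str.join " "
            (head :: tail.takeWhile (fun s => !pvIsStart ks s)))]
        else [])
        ++ pvWhileRest ks (tail.dropWhile (fun s => !pvIsStart ks s)) := by
  rw [pvWhileRest.eq_def]
  rfl

-- port A is the fold of pvStepA over the stripped lines, flushed by pvFin
theorem pv_split_records_eq_fin (data : List String) (ks : List String) :
    split_records data ks
      = pvFin ((data.map PySem.Str.strip).foldl (pvStepA ks) ([], "")) := by
  unfold split_records pvFin pvStepA pvIsStart
  rw [List.foldl_map]

-- A's fold equals pvRunA (appending onto the accumulated records).
theorem pv_foldA_eq_runA (ks : List String) (l : List String) (recs : List String) (cur : String) :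
    pvFin (l.foldl (pvStepA ks) (recs, cur)) = recs ++ pvRunA ks cur l := by
  induction l generalizing recs cur with
  | nil =>
    simp only [List.foldl_nil, pvFin, pvRunA]
    by_cases h : cur = "" <;> simp [h]
  | cons x xs ih =>
    simp only [List.foldl_cons, pvStepA, pvRunA]
    by_cases hx : pvIsStart ks x <;> by_cases h : cur = "" <;>
      simp [hx, h, ih, List.append_assoc]

-- pvRunA on a keyword-headed segment equals B's while loop.
theorem pv_runA_kw (ks : List String) (xs : List String) (seg : List String) (h : seg ≠ []) :
    pvRunA ks (PySem.Str.join " " seg) xs =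
      (if PySem.Str.join " " (seg ++ xs.takeWhile (fun s => !pvIsStart ks s)) ≠ "" then
          [PySem.Str.strip (PySem.Str.join " " (seg ++ xs.takeWhile (fun s => !pvIsStart ks s)))]
        else [])
        ++ pvWhileRest ks (xs.dropWhile (fun s => !pvIsStart ks s)) := by
  induction xs generalizing seg with
  | nil =>
    simp [pvRunA, pvWhileRest_nil]
  | cons x xs ih =>
    by_cases hx : pvIsStart ks x
    · simp only [pvRunA, hx, reduceIte, List.takeWhile_cons, List.dropWhile_cons, Bool.not_true,
        Bool.false_eq_true, List.append_nil]
      have hstep := ih [x] (by simp)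
      simp only [List.cons_append, List.nil_append] at hstep
      rw [pv_join_singleton] at hstep
      rw [hstep, pvWhileRest_cons]
      simp only [pv_join_ne_empty_iff]
    · simp only [pvRunA, hx, List.takeWhile_cons, List.dropWhile_cons, Bool.not_false,
        Bool.false_eq_true, reduceIte]
      rw [pv_join_append_singleton _ _ h, ih (seg ++ [x]) (by simp)]
      simp [List.append_assoc]

theorem pv_runA_head (ks : List String) (x : String) (xs : List String) :
    pvRunA ks x xs = pvWhileRest ks (x :: xs) := by
  have h1 := pv_runA_kw ks xs [x] (by simp)
  simp only [List.cons_append, List.nil_append] at h1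
  rw [pv_join_singleton] at h1
  rw [h1, pvWhileRest_cons]
  simp only [pv_join_ne_empty_iff]

-- the leading (non-keyword) segment: cur = " " + join(acc); one record is always flushed.
theorem pv_runA_lead (ks : List String) (xs : List String) (acc : List String) (h : acc ≠ []) :
    pvRunA ks (" " ++ PySem.Str.join " " acc) xs =
      [PySem.Str.strip (PySem.Str.join " " (acc ++ xs.takeWhile (fun s => !pvIsStart ks s)))]
        ++ pvWhileRest ks (xs.dropWhile (fun s => !pvIsStart ks s)) := by
  induction xs generalizing acc with
  | nil =>
    simp only [pvRunA, List.takeWhile_nil, List.dropWhile_nil, List.append_nil, pvWhileRest_nil]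
    rw [if_pos (pv_space_append_ne _), pv_strip_space_append]
  | cons x xs ih =>
    by_cases hx : pvIsStart ks x
    · simp only [pvRunA, hx, reduceIte, List.takeWhile_cons, List.dropWhile_cons, Bool.not_true,
        Bool.false_eq_true, List.append_nil]
      rw [if_pos (pv_space_append_ne _), pv_strip_space_append, pv_runA_head]
    · simp only [pvRunA, hx, List.takeWhile_cons, List.dropWhile_cons, Bool.not_false,
        Bool.false_eq_true, reduceIte]
      rw [pv_lead_step _ _ h, ih (acc ++ [x]) (by simp)]
      simp [List.append_assoc]

-- ===== VERDICT (by name: the statement is the Claim_ definition above) =====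
theorem split_records_spec : Claim_equal_split_records := by
  intro data ks _
  show split_records data ks = split_records_alt data ks
  rw [pv_split_records_eq_fin, pv_foldA_eq_runA]
  simp only [List.nil_append, split_records_alt, pvSplitAtNextStart]
  cases hs : data.map PySem.Str.strip with
  | nil =>
    simp [pvRunA, pvWhileRest_nil]
  | cons x xs =>
    by_cases hx : pvIsStart ks x
    · simp only [pvRunA, hx, reduceIte, ne_eq, not_true_eq_false, List.takeWhile_cons,
        List.dropWhile_cons, Bool.not_true, Bool.false_eq_true, List.nil_append]
      rw [pv_runA_head]
    · have h0 : ("" ++ " " ++ x) = " " ++ PySem.Str.join " " [x] := by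
        rw [pv_join_singleton]
        simp
      simp only [pvRunA, hx, Bool.false_eq_true, reduceIte, List.takeWhile_cons,
        List.dropWhile_cons, Bool.not_false]
      rw [h0, pv_runA_lead ks xs [x] (by simp)]
      simp
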